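-- pv_equiv track=rewrite | github.com/sametcatakli/algo1 | cpumons/novembre/chambre.py | trouver
-- ===== SOURCE A (Python) =====
-- def trouver(chambre, etiquette):
--     objets = []
--     position = []
--     for i in chambre:
--         for j in i:
--             if j not in objets:
--                 objets.append(j)
--
--     if etiquette not in objets:
--         return []
--
--     for i in range(len(chambre)):
--         for j in range(len(chambre[i])):
--             if chambre[i][j] == etiquette:
--                 position.append((i, j))
--     return position
-- ===== SOURCE B (Python) =====
-- def trouver(chambre, etiquette):
--     index = {}
--     for i, ligne in enumerate(chambre):
--         for j, objet in enumerate(ligne):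
--             index.setdefault(objet, []).append((i, j))
--     return index.get(etiquette, [])
-- ===== Notes on version B (the rewrite author's own statement) =====
-- stated objective: faster
-- what changed: Replaces A's two scans (a dedup presence-check pass with an O(u) list membership test per cell, plus an index-based collection pass) with a single enumerate pass that groups all positions by label in a dict, answered by one .get lookup.
import Mathlib
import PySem

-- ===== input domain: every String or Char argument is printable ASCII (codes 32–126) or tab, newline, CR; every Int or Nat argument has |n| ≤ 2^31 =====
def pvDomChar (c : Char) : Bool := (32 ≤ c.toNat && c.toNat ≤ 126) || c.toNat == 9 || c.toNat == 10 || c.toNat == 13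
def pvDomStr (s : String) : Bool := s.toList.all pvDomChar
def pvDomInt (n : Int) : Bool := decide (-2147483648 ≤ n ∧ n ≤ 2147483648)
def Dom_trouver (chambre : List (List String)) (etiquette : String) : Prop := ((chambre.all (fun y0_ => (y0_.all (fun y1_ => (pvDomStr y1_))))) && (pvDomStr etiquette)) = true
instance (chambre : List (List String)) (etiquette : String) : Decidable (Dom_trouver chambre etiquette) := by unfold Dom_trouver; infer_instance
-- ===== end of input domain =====

-- B replaces A's two scans (dedup presence check + index-based collection) with one
-- enumerate pass that groups all positions by label in a dict, answered by a single lookup.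

-- ===== PORT A =====
def trouver (chambre : List (List String)) (etiquette : String) : List (Int × Int) :=
  let objets : List String :=
    chambre.foldl (fun objets i =>
      i.foldl (fun objets j => if objets.contains j then objets else objets ++ [j]) objets) []
  if objets.contains etiquette = false then []
  else
    (PySem.List.pyRange 0 (chambre.length : Int) 1).foldl (fun position i =>
      (PySem.List.pyRange 0 ((PySem.List.pyGetD chambre i []).length : Int) 1).foldl (fun position j =>
        if PySem.List.pyGetD (PySem.List.pyGetD chambre i []) j "" == etiquette
        then position ++ [(i, j)] else position) position) []

-- ===== PORT B =====
def trouver_alt (chambre : List (List String)) (etiquette : String) : List (Int × Int) :=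
  let index : PySem.Dict String (List (Int × Int)) :=
    (PySem.List.enumerate chambre 0).foldl (fun index p =>
      (PySem.List.enumerate p.2 0).foldl (fun index q =>
        index.modify q.2 [] (· ++ [(p.1, q.1)])) index) PySem.Dict.empty
  index.getD etiquette []

-- ===== PRECONDITION & SPEC =====
def Spec_trouver (chambre : List (List String)) (etiquette : String) (out : List (Int × Int)) : Prop := out = trouver_alt chambre etiquette
instance (chambre : List (List String)) (etiquette : String) (out : List (Int × Int)) : Decidable (Spec_trouver chambre etiquette out) := by unfold Spec_trouver; infer_instance

-- ===== CLAIM (what is proved, stated in full; the proofs are below) =====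
def Claim_equal_trouver : Prop := ∀ (chambre : List (List String)) (etiquette : String), Dom_trouver chambre etiquette → Spec_trouver chambre etiquette (trouver chambre etiquette)

-- ===== LEMMAS AND PROOFS =====

/-- Common row-major characterisation of the result. -/
def pvCommon (chambre : List (List String)) (etiquette : String) : List (Int × Int) :=
  (PySem.List.enumerate chambre 0).flatMap (fun p =>
    ((PySem.List.enumerate p.2 0).filter (fun q => q.2 == etiquette)).map (fun q => (p.1, q.1)))

theorem foldl_over_flatMap {α β γ : Type} (g : α → List β) (f : γ → β → γ) :
    ∀ (l : List α) (init : γ),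
      (l.flatMap g).foldl f init = l.foldl (fun acc x => (g x).foldl f acc) init := by
  intro l
  induction l with
  | nil => intro init; rfl
  | cons x xs ih => intro init; simp [List.foldl_append, ih]

theorem alt_eq_common (chambre : List (List String)) (etiquette : String) :
    trouver_alt chambre etiquette = pvCommon chambre etiquette := by
  unfold trouver_alt pvCommon
  have h : (PySem.List.enumerate chambre 0).foldl (fun index p =>
      (PySem.List.enumerate p.2 0).foldl (fun index q =>
        index.modify q.2 [] (· ++ [(p.1, q.1)])) index)
      (PySem.Dict.empty (κ := String) (ν := List (Int × Int)))
      = (((PySem.List.enumerate chambre 0).flatMap (fun p =>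
          (PySem.List.enumerate p.2 0).map (fun q => (q.2, (p.1, q.1))))).foldl
          (fun d r => d.modify r.1 [] (· ++ [r.2])) PySem.Dict.empty) := by
    rw [foldl_over_flatMap]
    simp only [List.foldl_map]
  simp only [h, PySem.Dict.getD_foldl_modify_append, List.filter_flatMap, List.map_flatMap]
  simp [List.filter_map, List.map_map, Function.comp_def]

theorem a_loop_eq_common (chambre : List (List String)) (etiquette : String) :
    ((PySem.List.pyRange 0 (chambre.length : Int) 1).foldl (fun position i =>
      (PySem.List.pyRange 0 ((PySem.List.pyGetD chambre i []).length : Int) 1).foldl (fun position j =>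
        if PySem.List.pyGetD (PySem.List.pyGetD chambre i []) j "" == etiquette
        then position ++ [(i, j)] else position) position) [])
    = pvCommon chambre etiquette := by
  unfold pvCommon
  simp only [PySem.List.foldl_append_if]
  rw [PySem.List.foldl_append_eq_flatMap, List.nil_append]
  rw [PySem.List.enumerate_eq_map_pyRange (d := ([] : List String)), List.flatMap_map]
  simp only [PySem.List.len_eq]
  congr 1
  funext i
  rw [PySem.List.enumerate_eq_map_pyRange (d := ("" : String)), List.filter_map,
    List.map_map]
  simp [Function.comp_def, PySem.List.len_eq]

theorem common_nil_of_not_mem (chambre : List (List String)) (etiquette : String)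
    (h : ∀ row ∈ chambre, etiquette ∉ row) :
    pvCommon chambre etiquette = [] := by
  unfold pvCommon
  rw [List.flatMap_eq_nil_iff]
  intro x hx
  rcases (PySem.List.mem_enumerate_iff _ _ _).mp hx with ⟨k, hk, rfl⟩
  have hrow := h chambre[k] (List.getElem_mem hk)
  rw [List.map_eq_nil_iff, List.filter_eq_nil_iff]
  intro q hq hbeq
  rcases (PySem.List.mem_enumerate_iff _ _ _).mp hq with ⟨k', hk', rfl⟩
  exact hrow ((beq_iff_eq.mp hbeq) ▸ List.getElem_mem hk')

theorem objets_mem (etiquette : String) :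
    ∀ (chambre : List (List String)) (acc : List String),
      (etiquette ∈ chambre.foldl (fun objets i =>
        i.foldl (fun objets j => if objets.contains j then objets else objets ++ [j]) objets) acc)
      ↔ (etiquette ∈ acc ∨ ∃ row ∈ chambre, etiquette ∈ row) := by
  have inner : ∀ (row : List String) (acc : List String),
      (etiquette ∈ row.foldl (fun objets j => if objets.contains j then objets else objets ++ [j]) acc)
      ↔ (etiquette ∈ acc ∨ etiquette ∈ row) := by
    intro row
    induction row with
    | nil => intro acc; simp
    | cons x xs ih =>
      intro acc
      simp only [List.foldl_cons, List.mem_cons]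
      by_cases hx : acc.contains x = true
      · rw [if_pos hx, ih]
        rw [List.contains_iff_mem] at hx
        constructor
        · tauto
        · rintro (h | rfl | h) <;> tauto
      · rw [if_neg (by simpa using hx), ih]
        simp only [List.mem_append, List.mem_singleton]
        tauto
  intro chambre
  induction chambre with
  | nil => intro acc; simp
  | cons row rest ih =>
    intro acc
    simp only [List.foldl_cons, ih, inner, List.mem_cons]
    constructor
    · rintro ((h | h) | ⟨r, hr, h⟩) <;> [tauto; exact Or.inr ⟨row, Or.inl rfl, h⟩;
        exact Or.inr ⟨r, Or.inr hr, h⟩]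
    · rintro (h | ⟨r, (rfl | hr), h⟩) <;> tauto

-- ===== VERDICT (by name: the statement is the Claim_ definition above) =====
theorem trouver_spec : Claim_equal_trouver := by
  intro chambre etiquette _
  unfold Spec_trouver trouver
  rw [alt_eq_common]
  simp only
  rw [a_loop_eq_common]
  by_cases hm : etiquette ∈ chambre.foldl (fun objets i =>
      i.foldl (fun objets j => if objets.contains j then objets else objets ++ [j]) objets) []
  · rw [if_neg (by
      rw [List.contains_eq_mem etiquette (chambre.foldl (fun objets i =>
        i.foldl (fun objets j => if objets.contains j then objets else objets ++ [j]) objets) [])]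
      rw [decide_eq_true hm]
      decide)]
  · rw [if_pos (by
      rw [List.contains_eq_mem etiquette (chambre.foldl (fun objets i =>
        i.foldl (fun objets j => if objets.contains j then objets else objets ++ [j]) objets) [])]
      exact decide_eq_false hm)]
    rw [objets_mem] at hm
    symm
    apply common_nil_of_not_mem
    intro row hrow hmem
    exact hm (Or.inr ⟨row, hrow, hmem⟩)
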